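-- pv_equiv track=rewrite | github.com/cassiobarth/geografia_da_cognicao | src/cog/cog_03_process_unified_saeb_pypeline.py | get_quantity_column
-- ===== SOURCE A (Python) =====
-- def get_quantity_column(header, grade):
--     header_upper = {h.upper(): h for h in header}
--     candidates = [
--         f"NU_PRESENTES_{grade}", f"NU_PRESENTES_{grade}_LP",
--         f"QTD_ALUNOS_{grade}", f"N_ALUNOS_{grade}", "NU_PRESENTES"
--     ]
--     if grade == '3EM': candidates += ["NU_PRESENTES_EM", "NU_PRESENTES_EM_LP"]
--
--     for cand in candidates:
--         if cand in header_upper: return header_upper[cand]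
--     return None
-- ===== SOURCE B (Python) =====
-- def get_quantity_column(header, grade):
--     candidates = [
--         f"NU_PRESENTES_{grade}", f"NU_PRESENTES_{grade}_LP",
--         f"QTD_ALUNOS_{grade}", f"N_ALUNOS_{grade}", "NU_PRESENTES"
--     ]
--     if grade == '3EM': candidates += ["NU_PRESENTES_EM", "NU_PRESENTES_EM_LP"]
--     rank = {c: i for i, c in enumerate(candidates)}
--     miss = len(candidates)
--     best, best_rank = None, miss
--     for h in header:
--         r = rank.get(h.upper(), miss)
--         if r < best_rank:
--             best, best_rank = h, r
--     return best
-- ===== Notes on version B (the rewrite author's own statement) =====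
-- stated objective: alternative
-- what changed: Inverts the loop structure: instead of probing an uppercase-keyed header dict candidate by candidate, B builds a candidate-priority map once and makes a single pass over the header tracking the best-ranked (first among equals) matching column; Pre_ excludes headers containing two differently-spelled names with the same uppercase form, where A's dict-overwrite makes it return the later spelling while B returns the earlier.
-- outside the precondition, e.g. on get_quantity_column(['nu_presentes', 'NU_PRESENTES'], '5EF'): A returns 'NU_PRESENTES', B returns 'nu_presentes'
import Mathlib
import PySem

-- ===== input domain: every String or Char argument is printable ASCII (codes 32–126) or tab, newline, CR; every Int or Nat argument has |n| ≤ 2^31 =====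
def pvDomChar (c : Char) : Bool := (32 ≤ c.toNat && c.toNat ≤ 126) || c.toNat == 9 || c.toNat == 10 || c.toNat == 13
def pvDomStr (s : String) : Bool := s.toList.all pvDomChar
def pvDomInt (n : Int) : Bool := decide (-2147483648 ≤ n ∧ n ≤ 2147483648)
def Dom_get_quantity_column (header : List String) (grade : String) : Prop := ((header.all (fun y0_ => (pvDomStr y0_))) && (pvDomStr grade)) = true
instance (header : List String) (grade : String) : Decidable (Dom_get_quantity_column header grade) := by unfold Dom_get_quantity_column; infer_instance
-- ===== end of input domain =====

-- B inverts the loop structure: instead of probing an uppercase-keyed header dict candidate by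
-- candidate, it builds a candidate-priority map once and makes a single pass over the header
-- tracking the best-ranked matching column (objective: alternative).

-- ===== PORT A =====
-- the candidate list, built identically by both Pythons
def pvCandidates (grade : String) : List String :=
  let candidates := ["NU_PRESENTES_" ++ grade, "NU_PRESENTES_" ++ grade ++ "_LP",
                     "QTD_ALUNOS_" ++ grade, "N_ALUNOS_" ++ grade, "NU_PRESENTES"]
  if grade == "3EM" then candidates ++ ["NU_PRESENTES_EM", "NU_PRESENTES_EM_LP"] else candidates

-- 'for cand in candidates: if cand in header_upper: return header_upper[cand]'
def pvLoopA (d : PySem.Dict String String) : List String → Option String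
  | [] => none
  | c :: cs => match d.get? c with
      | some v => some v
      | none => pvLoopA d cs

def get_quantity_column (header : List String) (grade : String) : Option String :=
  let header_upper := header.foldl (fun d h => d.insert (PySem.Str.upper h) h) PySem.Dict.empty
  pvLoopA header_upper (pvCandidates grade)

-- ===== PORT B =====
-- rank = {c: i for i, c in enumerate(candidates)}; one pass over header keeping the
-- first header whose candidate rank is strictly smaller than the best so far
def get_quantity_column_alt (header : List String) (grade : String) : Option String :=
  let candidates := pvCandidates grade
  let rank : PySem.Dict String Int :=
    (PySem.List.enumerate candidates).foldl (fun d p => d.insert p.2 p.1) PySem.Dict.empty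
  let miss : Int := PySem.List.len candidates
  let st := header.foldl
    (fun (st : Option String × Int) h =>
      let r := rank.getD (PySem.Str.upper h) miss
      if r < st.2 then (some h, r) else st)
    ((none : Option String), miss)
  st.1

-- ===== PRECONDITION & SPEC =====
-- Pre_ excludes headers containing two differently-spelled names with the same uppercase form:
-- there A's dict-overwrite accidentally returns the later spelling while B returns the earlier,
-- and neither order is specified.
def Pre_get_quantity_column (header : List String) (grade : String) : Prop :=
  ∀ a ∈ header, ∀ b ∈ header, PySem.Str.upper a = PySem.Str.upper b → a = b
instance (header : List String) (grade : String) : Decidable (Pre_get_quantity_column header grade) := by unfold Pre_get_quantity_column; infer_instance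

def pvWitness_get_quantity_column : List String × String := (["escola", "NU_presentes_5EF"], "5EF")

def Spec_get_quantity_column (header : List String) (grade : String) (out : Option String) : Prop := out = get_quantity_column_alt header grade
instance (header : List String) (grade : String) (out : Option String) : Decidable (Spec_get_quantity_column header grade out) := by unfold Spec_get_quantity_column; infer_instance

-- ===== CLAIM (what is proved, stated in full; the proofs are below) =====
def Claim_equal_get_quantity_column : Prop := ∀ (header : List String) (grade : String), Dom_get_quantity_column header grade → Pre_get_quantity_column header grade → Spec_get_quantity_column header grade (get_quantity_column header grade)

-- ===== LEMMAS AND PROOFS =====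

-- rank a header column gets in B's priority map: index of its uppercase form among the
-- candidates, or the list length when absent
def pvRank (cs : List String) (h : String) : Int :=
  if PySem.Str.upper h ∈ cs then ((cs.idxOf (PySem.Str.upper h) : Nat) : Int) else (cs.length : Int)

-- A's dict lookup at key c = a last-match fold over the headers
theorem pv_fold_get (c : String) (header : List String) :
    ∀ d : PySem.Dict String String,
      (header.foldl (fun d h => d.insert (PySem.Str.upper h) h) d).get? c
        = header.foldl (fun last h => if PySem.Str.upper h == c then some h else last) (d.get? c) := by
  induction header with
  | nil => intro d; rfl
  | cons h t ih =>
      intro d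
      simp only [List.foldl_cons, ih]
      by_cases hc : PySem.Str.upper h = c
      · simp [hc, PySem.Dict.get?_insert_self]
      · rw [PySem.Dict.get?_insert_of_ne _ _ (by exact fun e => hc e.symm)]
        simp [hc]

-- A's candidate loop is findSome? of the dict lookup
theorem pv_loopA_eq_findSome (d : PySem.Dict String String) :
    ∀ cs : List String, pvLoopA d cs = cs.findSome? (fun c => d.get? c) := by
  intro cs
  induction cs with
  | nil => rfl
  | cons c cs ih => simp only [pvLoopA, List.findSome?_cons]; cases d.get? c <;> simp [ih]

-- once the unique match is in the accumulator, the last-match fold keeps it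
theorem pv_keep_acc (c a : String) (t : List String)
    (h : ∀ x ∈ t, PySem.Str.upper x = c → x = a) :
    t.foldl (fun last h => if PySem.Str.upper h == c then some h else last) (some a) = some a := by
  induction t with
  | nil => rfl
  | cons x t ih =>
      simp only [List.foldl_cons]
      by_cases hx : PySem.Str.upper x = c
      · have hxa : x = a := h x (List.mem_cons_self ..) hx
        rw [if_pos (by simp [hx]), hxa]
        exact ih (fun y hy hyc => h y (List.mem_cons_of_mem _ hy) hyc)
      · rw [if_neg (by simp [hx])]
        exact ih (fun y hy hyc => h y (List.mem_cons_of_mem _ hy) hyc)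

-- under Pre_ the last match is the first match
theorem pv_last_eq_find (header : List String)
    (hpre : ∀ a ∈ header, ∀ b ∈ header, PySem.Str.upper a = PySem.Str.upper b → a = b)
    (c : String) :
    header.foldl (fun last h => if PySem.Str.upper h == c then some h else last) none
      = header.find? (fun h => PySem.Str.upper h == c) := by
  induction header with
  | nil => rfl
  | cons h t ih =>
      simp only [List.foldl_cons]
      by_cases hc : PySem.Str.upper h = c
      · rw [if_pos (by simp [hc]), List.find?_cons_of_pos (by simp [hc])]
        exact pv_keep_acc c h t (fun x hx hxc =>
          hpre x (List.mem_cons_of_mem _ hx) h (List.mem_cons_self ..) (by rw [hxc, hc]))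
      · rw [if_neg (by simp [hc]), List.find?_cons_of_neg (by simp [hc])]
        exact ih (fun a ha b hb => hpre a (List.mem_cons_of_mem _ ha) b (List.mem_cons_of_mem _ hb))

-- an insert-fold over pairs whose keys avoid c does not change the lookup at c
theorem pv_getD_preserve (ps : List (Int × String)) :
    ∀ (d : PySem.Dict String Int) (c : String) (dflt : Int), (∀ p ∈ ps, p.2 ≠ c) →
      ((ps.foldl (fun d p => d.insert p.2 p.1) d).getD c dflt) = d.getD c dflt := by
  induction ps with
  | nil => intro d c dflt _; rfl
  | cons p ps ih =>
      intro d c dflt hk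
      simp only [List.foldl_cons]
      rw [ih _ _ _ (fun q hq => hk q (List.mem_cons_of_mem _ hq))]
      exact PySem.Dict.getD_insert_of_ne _ _ _ (fun e => hk p (List.mem_cons_self ..) e.symm)

-- value of B's rank dict: the candidate's index, or the default when absent
theorem pv_getD_enum_fold (cs : List String) :
    ∀ (s : Int) (d : PySem.Dict String Int) (c : String) (dflt : Int), cs.Nodup →
      (((PySem.List.enumerate cs s).foldl (fun d p => d.insert p.2 p.1) d).getD c dflt)
        = if c ∈ cs then s + (cs.idxOf c : Int) else d.getD c dflt := by
  induction cs with
  | nil => intro s d c dflt _; simp [PySem.List.enumerate_nil]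
  | cons x cs ih =>
      intro s d c dflt hnd
      rw [PySem.List.enumerate_cons]
      simp only [List.foldl_cons]
      by_cases hc : c = x
      · subst hc
        have hnotin : c ∉ cs := (List.nodup_cons.mp hnd).1
        rw [pv_getD_preserve _ _ _ _ (fun p hp => by
          rcases (PySem.List.mem_enumerate_iff _ _ _).mp hp with ⟨k, hk, rfl⟩
          exact fun e => hnotin (e ▸ List.getElem_mem hk))]
        simp [PySem.Dict.getD_insert_self, List.idxOf_cons_self]
      · rw [ih (s + 1) _ _ _ (List.nodup_cons.mp hnd).2]
        rw [PySem.Dict.getD_insert_of_ne _ _ _ hc]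
        by_cases hmem : c ∈ cs
        · simp only [hmem, if_true, List.mem_cons, hc, false_or]
          rw [List.idxOf_cons_ne _ (fun e => hc e.symm)]
          push_cast
          ring
        · simp [hmem, hc]

-- findSome? of the constantly-none function finds nothing
theorem pv_findSome_none (l : List String) :
    l.findSome? (fun _ => (none : Option String)) = none := by
  induction l with
  | nil => rfl
  | cons x l ih => simp [ih]

-- findSome? only depends on the values of the function on the list
theorem pv_findSome_congr (l : List String) (f g : String → Option String)
    (h : ∀ x ∈ l, f x = g x) : l.findSome? f = l.findSome? g := by
  induction l with
  | nil => rfl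
  | cons x l ih =>
      simp only [List.findSome?_cons, h x (List.mem_cons_self ..)]
      cases g x with
      | none => exact ih (fun y hy => h y (List.mem_cons_of_mem _ hy))
      | some v => rfl

-- in a Nodup list, elements of the taken prefix differ from elements of the dropped suffix
theorem pv_take_drop_ne {cs : List String} (hnd : cs.Nodup) {rb : Nat} {c u : String}
    (hc : c ∈ cs.take rb) (hu : u ∈ cs.drop rb) : u ≠ c := by
  have h2 := hnd
  rw [← List.take_append_drop rb cs, List.nodup_append] at h2
  intro he
  exact h2.2.2 c hc u hu he.symm

-- the heart of the equivalence: B's single best-rank pass computes, for any prefix budget rb,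
-- the first header matching the earliest of the first rb candidates (or the accumulator)
theorem pv_bestFold_eq (cs : List String) (hnd : cs.Nodup) :
    ∀ (t : List String) (b : Option String) (rb : Nat), rb ≤ cs.length →
      (t.foldl (fun st h => if pvRank cs h < st.2 then (some h, pvRank cs h) else st)
          (b, (rb : Int))).1
        = ((cs.take rb).findSome? (fun c => t.find? (fun h => PySem.Str.upper h == c))).or b := by
  intro t
  induction t with
  | nil =>
      intro b rb _
      simp [pv_findSome_none]
  | cons h t ih =>
      intro b rb hrb
      simp only [List.foldl_cons]
      by_cases hlt : pvRank cs h < ((rb : Nat) : Int)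
      · have hm : PySem.Str.upper h ∈ cs := by
          by_contra hmem
          simp only [pvRank, hmem, if_false] at hlt
          have : cs.length < rb := by exact_mod_cast hlt
          omega
        have hil : cs.idxOf (PySem.Str.upper h) < cs.length := List.idxOf_lt_length_of_mem hm
        have hrank : pvRank cs h = ((cs.idxOf (PySem.Str.upper h) : Nat) : Int) := by
          simp [pvRank, hm]
        have hirb : cs.idxOf (PySem.Str.upper h) < rb := by
          rw [hrank] at hlt; exact_mod_cast hlt
        rw [if_pos hlt, hrank]
        rw [ih (some h) (cs.idxOf (PySem.Str.upper h)) (le_of_lt hil)]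
        have hsplit : cs.take rb = cs.take (cs.idxOf (PySem.Str.upper h)) ++
            PySem.Str.upper h :: ((cs.drop (cs.idxOf (PySem.Str.upper h) + 1)).take (rb - (cs.idxOf (PySem.Str.upper h) + 1))) := by
          conv_lhs => rw [show rb = cs.idxOf (PySem.Str.upper h) + (rb - cs.idxOf (PySem.Str.upper h)) by omega,
            List.take_add]
          congr 1
          rw [List.drop_eq_getElem_cons hil,
            show rb - cs.idxOf (PySem.Str.upper h) = (rb - (cs.idxOf (PySem.Str.upper h) + 1)) + 1 by omega,
            List.take_succ_cons, List.getElem_idxOf]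
        rw [hsplit, List.findSome?_append, List.findSome?_cons,
          List.find?_cons_of_pos (by simp)]
        have hdropmem : PySem.Str.upper h ∈ cs.drop (cs.idxOf (PySem.Str.upper h)) := by
          rw [List.drop_eq_getElem_cons hil, List.getElem_idxOf]
          exact List.mem_cons_self ..
        have hcong : (cs.take (cs.idxOf (PySem.Str.upper h))).findSome?
              (fun c => List.find? (fun x => PySem.Str.upper x == c) (h :: t))
            = (cs.take (cs.idxOf (PySem.Str.upper h))).findSome?
              (fun c => List.find? (fun x => PySem.Str.upper x == c) t) := by
          apply pv_findSome_congr
          intro c hcmem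
          exact List.find?_cons_of_neg (by simp [pv_take_drop_ne hnd hcmem hdropmem])
        rw [hcong, Option.or_assoc]
        rfl
      · rw [if_neg hlt]
        rw [ih b rb hrb]
        congr 1
        apply pv_findSome_congr
        intro c hcmem
        have hne : PySem.Str.upper h ≠ c := by
          by_cases hm : PySem.Str.upper h ∈ cs
          · have hil : cs.idxOf (PySem.Str.upper h) < cs.length := List.idxOf_lt_length_of_mem hm
            have hge : rb ≤ cs.idxOf (PySem.Str.upper h) := by
              have hnl : ¬ ((cs.idxOf (PySem.Str.upper h) : Nat) : Int) < (rb : Int) := by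
                simpa [pvRank, hm] using hlt
              omega
            have hdropmem : PySem.Str.upper h ∈ cs.drop rb := by
              have h1 : PySem.Str.upper h ∈ cs.drop (cs.idxOf (PySem.Str.upper h)) := by
                rw [List.drop_eq_getElem_cons hil, List.getElem_idxOf]
                exact List.mem_cons_self ..
              have h2 : cs.drop (cs.idxOf (PySem.Str.upper h))
                  = (cs.drop rb).drop (cs.idxOf (PySem.Str.upper h) - rb) := by
                rw [List.drop_drop]
                congr 1
                omega
              exact List.mem_of_mem_drop (h2 ▸ h1)
            exact pv_take_drop_ne hnd hcmem hdropmem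
          · exact fun e => hm (e ▸ List.mem_of_mem_take hcmem)
        exact (List.find?_cons_of_neg (by simp [hne])).symm

-- the candidate list never contains duplicates, whatever the grade string is
theorem pv_cand_nodup (grade : String) : (pvCandidates grade).Nodup := by
  by_cases hg : grade = "3EM"
  · subst hg; decide
  · have hne : (grade == "3EM") = false := by simp [hg]
    apply List.Nodup.of_map String.toList
    simp [pvCandidates, hne, List.nodup_cons]

-- ===== VERDICT (by name: the statement is the Claim_ definition above) =====
theorem get_quantity_column_spec : Claim_equal_get_quantity_column := by
  intro header grade _ hpre
  unfold Spec_get_quantity_column get_quantity_column get_quantity_column_alt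
  have hA : ∀ c, (header.foldl (fun d h => d.insert (PySem.Str.upper h) h) PySem.Dict.empty).get? c
      = header.find? (fun h => PySem.Str.upper h == c) := by
    intro c
    rw [pv_fold_get, PySem.Dict.get?_empty]
    exact pv_last_eq_find header hpre c
  have hnd := pv_cand_nodup grade
  have hr : ∀ h : String,
      (((PySem.List.enumerate (pvCandidates grade) 0).foldl (fun d p => d.insert p.2 p.1)
          PySem.Dict.empty).getD (PySem.Str.upper h) (((pvCandidates grade).length : Nat) : Int))
        = pvRank (pvCandidates grade) h := by
    intro h
    rw [pv_getD_enum_fold _ 0 _ _ _ hnd, PySem.Dict.getD_empty]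
    simp [pvRank]
  simp only [pv_loopA_eq_findSome, hA, PySem.List.len_eq, hr]
  rw [pv_bestFold_eq (pvCandidates grade) hnd header none (pvCandidates grade).length le_rfl]
  rw [List.take_length, Option.or_none]
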